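-- pv_equiv track=rewrite | github.com/kiipo0623/Algorithm-2021 | test.py | solution
-- ===== SOURCE A (Python) =====
-- def solution(n, k, cmd):
--     linked_list = {i : [i-1, i+1] for i in range(1, n+1)}
--     OX = ["O" for i in range(1, n+1)]
--     stack = []
--
--     k += 1
--
--     for c in cmd:
--         if c[0] == 'D':
--             for _ in range(int(c[2:])):
--                 k = linked_list[k][1]
--         elif c[0] == 'U':
--             for _ in range(int(c[2:])):
--                 k = linked_list[k][0]
--         elif c[0] == 'C':
--             prev, next = linked_list[k]
--             stack.append([prev, next, k])
--             OX[k-1] = "X"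
-- #
--             if next == n+1:
--                 k = linked_list[k][0]
--             else:
--                 k = linked_list[k][1]
-- #
--             if prev == 0:
--                 # prev가 0이라는 건.. 원래거가 첫번째였다는뜻
--                 # 이 경우에는 다음것만 정하면 된다
--                 linked_list[next][0] = prev
--                 # 마지막
--             elif next == n+1:
--                 linked_list[prev][1] = next
--             else:
--                 linked_list[prev][1] = next
--                 linked_list[next][0] = prev
--         elif c[0] == 'Z':
--             prev, next, now = stack.pop()
--             OX[now-1] = "O"
--
--             if prev == 0:
--                 linked_list[next][0] = now
--             elif next == n+1:
--                 linked_list[prev][1] = now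
--             else:
--                 linked_list[prev][1] = now
--                 linked_list[next][0] = now
--
--     return ''.join(OX)
-- ===== SOURCE B (Python) =====
-- def solution(n, k, cmd):
--     # Sorted array of alive row numbers + an integer cursor index: moves are
--     # index arithmetic, delete is a positional pop, restore re-inserts by rank.
--     alive = list(range(1, n + 1))
--     pos = k
--     stack = []
--     for c in cmd:
--         op = c[0]
--         if op == 'D':
--             pos += max(int(c[2:]), 0)   # range() semantics: a non-positive count moves nothing
--         elif op == 'U':
--             pos -= max(int(c[2:]), 0)
--         elif op == 'C':
--             stack.append(alive.pop(pos))
--             if pos == len(alive):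
--                 pos -= 1
--         elif op == 'Z':
--             v = stack.pop()
--             idx = sum(1 for a in alive if a < v)
--             alive.insert(idx, v)
--             if idx <= pos:
--                 pos += 1
--     s = set(alive)
--     return ''.join('O' if i in s else 'X' for i in range(1, n + 1))
-- ===== Notes on version B (the rewrite author's own statement) =====
-- stated objective: alternative
-- what changed: B replaces A's doubly-linked-list dict (cursor hops one node per step, delete/restore by pointer surgery) with a sorted array of alive row numbers plus an integer cursor index: D/U become index arithmetic, delete is a positional pop, restore re-inserts at the rank of the restored row.
import Mathlib
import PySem

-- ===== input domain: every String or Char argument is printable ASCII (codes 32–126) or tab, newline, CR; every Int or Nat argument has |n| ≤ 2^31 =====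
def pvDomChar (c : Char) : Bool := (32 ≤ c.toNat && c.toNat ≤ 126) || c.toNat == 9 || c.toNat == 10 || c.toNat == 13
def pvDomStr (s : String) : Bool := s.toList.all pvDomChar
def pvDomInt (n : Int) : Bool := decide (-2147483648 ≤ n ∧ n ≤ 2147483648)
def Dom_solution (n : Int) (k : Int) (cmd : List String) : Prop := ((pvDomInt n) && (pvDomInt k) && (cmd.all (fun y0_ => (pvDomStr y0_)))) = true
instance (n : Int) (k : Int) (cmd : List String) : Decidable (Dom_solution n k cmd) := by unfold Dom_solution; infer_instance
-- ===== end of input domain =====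

-- B replaces A's doubly-linked-list dict with a sorted array of alive rows plus an
-- integer cursor index (an alternative data structure; moves become index arithmetic).

-- shared command parsing (exact Python: c[0], int(c[2:]))
def cmdArg (c : String) : Option Int := PySem.Int.ofStr? (PySem.Str.slice c (some 2) none)

-- ===== PORT A =====
-- one iteration of A's `for c in cmd` loop (linked_list dict, OX list, cursor k, undo stack)
def stepA (n : Int)
    (s : PySem.Dict Int (Int × Int) × List String × Int × List (Int × Int × Int))
    (c : String) :
    PySem.Dict Int (Int × Int) × List String × Int × List (Int × Int × Int) :=
  match PySem.Str.pyGet? c 0 with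
  | none => s            -- c[0] on "": IndexError, excluded by Pre_
  | some ch =>
    let d := s.1; let ox := s.2.1; let k := s.2.2.1; let st := s.2.2.2
    if ch = 'D' then
      let x := (cmdArg c).getD 0     -- int(c[2:]); none = ValueError, excluded by Pre_
      (d, ox, (PySem.List.pyRange 0 x 1).foldl (fun kk _ => (d.getD kk (0, 0)).2) k, st)
    else if ch = 'U' then
      let x := (cmdArg c).getD 0
      (d, ox, (PySem.List.pyRange 0 x 1).foldl (fun kk _ => (d.getD kk (0, 0)).1) k, st)
    else if ch = 'C' then
      let pr := (d.getD k (0, 0)).1  -- linked_list[k]; KeyError excluded by Pre_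
      let nx := (d.getD k (0, 0)).2
      let st' := st ++ [(pr, nx, k)]
      let ox' := PySem.List.pySetD ox (k - 1) "X"
      let k' := if nx = n + 1 then (d.getD k (0, 0)).1 else (d.getD k (0, 0)).2
      let d' :=
        if pr = 0 then d.modify nx (0, 0) (fun p => (pr, p.2))
        else if nx = n + 1 then d.modify pr (0, 0) (fun p => (p.1, nx))
        else (d.modify pr (0, 0) (fun p => (p.1, nx))).modify nx (0, 0) (fun p => (pr, p.2))
      (d', ox', k', st')
    else if ch = 'Z' then
      match st.getLast? with
      | none => s        -- stack.pop() on []: IndexError, excluded by Pre_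
      | some e =>
        let pr := e.1; let nx := e.2.1; let now := e.2.2
        let st' := st.dropLast
        let ox' := PySem.List.pySetD ox (now - 1) "O"
        let d' :=
          if pr = 0 then d.modify nx (0, 0) (fun p => (now, p.2))
          else if nx = n + 1 then d.modify pr (0, 0) (fun p => (p.1, now))
          else (d.modify pr (0, 0) (fun p => (p.1, now))).modify nx (0, 0) (fun p => (now, p.2))
        (d', ox', k, st')
    else s

def solution (n : Int) (k : Int) (cmd : List String) : String :=
  let d0 := (PySem.List.pyRange 1 (n + 1) 1).foldl
      (fun d i => d.insert i (i - 1, i + 1)) PySem.Dict.empty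
  let ox0 := (PySem.List.pyRange 1 (n + 1) 1).map (fun _ => "O")
  let fin := cmd.foldl (stepA n) (d0, ox0, k + 1, [])
  PySem.Str.join "" fin.2.1

-- ===== PORT B =====
-- one iteration of B's loop (sorted alive array, Int cursor index pos, stack of removed rows)
def stepB (s : List Int × Int × List Int) (c : String) : List Int × Int × List Int :=
  match PySem.Str.pyGet? c 0 with
  | none => s            -- c[0] on "": IndexError, excluded by Pre_
  | some op =>
    let al := s.1; let pos := s.2.1; let st := s.2.2
    if op = 'D' then (al, pos + max ((cmdArg c).getD 0) 0, st)
    else if op = 'U' then (al, pos - max ((cmdArg c).getD 0) 0, st)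
    else if op = 'C' then
      match PySem.List.pop? al pos with
      | none => s        -- alive.pop(pos): IndexError, excluded by Pre_
      | some r =>
        let st' := st ++ [r.1]
        let pos' := if pos = (r.2.length : Int) then pos - 1 else pos
        (r.2, pos', st')
    else if op = 'Z' then
      match st.getLast? with
      | none => s        -- stack.pop() on []: IndexError, excluded by Pre_
      | some v =>
        let st' := st.dropLast
        let idx : Int := al.foldl (fun acc a => if a < v then acc + 1 else acc) 0
        let al' := PySem.List.insert al idx v
        let pos' := if idx ≤ pos then pos + 1 else pos
        (al', pos', st')
    else s

def solution_alt (n : Int) (k : Int) (cmd : List String) : String :=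
  let fin := cmd.foldl stepB (PySem.List.pyRange 1 (n + 1) 1, k, [])
  let se := PySem.Set.ofList fin.1
  PySem.Str.join ""
    ((PySem.List.pyRange 1 (n + 1) 1).map (fun i => if se.contains i then "O" else "X"))

-- ===== PRECONDITION & SPEC =====
-- `okCmds cmd p L rl` is a validity LEDGER over the command script: p is the cursor's
-- rank among alive rows (-1 / L are the two sentinel ends), L the alive-row count, rl
-- the deletion ranks of the rows on the undo stack (top first; a LIFO-cancellation
-- argument shows a dead row's re-insertion rank at pop time equals its deletion rank).
-- It holds EXACTLY on the scripts A finishes without raising: a move through a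
-- sentinel or from a sentinel, deleting with the cursor off the table or the table
-- about to empty, restoring with an empty stack, an empty command string, or a
-- non-integer move count are A's KeyError / IndexError / ValueError cases — nothing
-- on which A returns a value is excluded.
def okCmds : List String → Int → Int → List Int → Bool
  | [], _, _, _ => true
  | c :: r, p, L, rl =>
    match PySem.Str.pyGet? c 0 with
    | none => false
    | some ch =>
      if ch = 'D' then
        match cmdArg c with
        | none => false
        | some x =>
          if x ≤ 0 then okCmds r p L rl
          else decide (0 ≤ p) && decide (p + x ≤ L) && okCmds r (p + x) L rl
      else if ch = 'U' then
        match cmdArg c with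
        | none => false
        | some x =>
          if x ≤ 0 then okCmds r p L rl
          else decide (p ≤ L - 1) && decide (-1 ≤ p - x) && okCmds r (p - x) L rl
      else if ch = 'C' then
        decide (0 ≤ p) && decide (p < L) && decide (2 ≤ L) &&
          okCmds r (if p = L - 1 then p - 1 else p) (L - 1) (p :: rl)
      else if ch = 'Z' then
        match rl with
        | [] => false
        | i :: rl' => okCmds r (if i ≤ p then p + 1 else p) (L + 1) rl'
      else okCmds r p L rl

-- Pre_solution holds exactly when A raises no exception (KeyError on a sentinel or
-- non-key cursor, IndexError on an empty undo stack or empty command string,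
-- ValueError on a non-integer move count); it excludes no input on which A returns.
def Pre_solution (n : Int) (k : Int) (cmd : List String) : Prop :=
  okCmds cmd k (max n 0) [] = true
instance (n : Int) (k : Int) (cmd : List String) : Decidable (Pre_solution n k cmd) := by
  unfold Pre_solution; infer_instance

def pvWitness_solution : Int × Int × List String := (4, 2, ["C", "Z", "U 1"])

def Spec_solution (n : Int) (k : Int) (cmd : List String) (out : String) : Prop :=
  out = solution_alt n k cmd
instance (n : Int) (k : Int) (cmd : List String) (out : String) :
    Decidable (Spec_solution n k cmd out) := by unfold Spec_solution; infer_instance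

-- ===== CLAIM (what is proved, stated in full; the proofs are below) =====
def Claim_equal_solution : Prop :=
  ∀ (n : Int) (k : Int) (cmd : List String),
    Dom_solution n k cmd → Pre_solution n k cmd → Spec_solution n k cmd (solution n k cmd)

-- ===== LEMMAS AND PROOFS =====

lemma foldlConstIter {α β : Type} (l : List α) (f : β → β) (x : β) :
    l.foldl (fun a _ => f a) x = f^[l.length] x := by
  induction l generalizing x with
  | nil => rfl
  | cons h t ih => simpa [ih] using (Function.iterate_succ_apply f t.length (f x)).symm

-- the dict invariant, index-form: the linked-list entry of the i-th alive row points at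
-- its alive neighbours (0 below the first, n+1 past the last)
def DictInv (n : Int) (d : PySem.Dict Int (Int × Int)) (al : List Int) : Prop :=
  ∀ i : Nat, i < al.length →
    d.getD (al.getD i 0) (0, 0) =
      ((if i = 0 then 0 else al.getD (i - 1) 0),
       (if i + 1 = al.length then n + 1 else al.getD (i + 1) 0))

-- rank of v in al: number of elements below v
def rnk (al : List Int) (v : Int) : Nat := al.countP (fun a => decide (a < v))

-- sorted insertion of v into al at its rank
def insS (al : List Int) (v : Int) : List Int :=
  al.take (rnk al v) ++ v :: al.drop (rnk al v)

-- correspondence of the three stacks (read top-first, i.e. A/B stacks reversed):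
-- each A-entry (p, nx, now) stores the row `now` removed at that level together with its
-- alive neighbours as of that level, the dict still holds (p, nx) at the dead key `now`,
-- the B-stack holds `now` itself, and the ledger holds `now`'s re-insertion rank;
-- deeper levels see `now` re-inserted.
def StackRel (n : Int) (d : PySem.Dict Int (Int × Int)) :
    List Int → List (Int × Int × Int) → List Int → List Int → Prop
  | _, [], [], [] => True
  | al, e :: ra, w :: rb, i :: rl =>
    let p := e.1; let nx := e.2.1; let now := e.2.2; let c := rnk al now
    w = now ∧ 1 ≤ now ∧ now ≤ n ∧ now ∉ al ∧
    p = (if c = 0 then 0 else al.getD (c - 1) 0) ∧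
    nx = (if c = al.length then n + 1 else al.getD c 0) ∧
    d.getD now (0, 0) = (p, nx) ∧
    i = ((c : Nat) : Int) ∧
    StackRel n d (insS al now) ra rb rl
  | _, _, _, _ => False

-- the full simulation invariant between A's state, B's state and the ledger stack
structure SimInv (n : Int) (d : PySem.Dict Int (Int × Int)) (ox : List String) (ka : Int)
    (stA : List (Int × Int × Int)) (al : List Int) (pos : Int) (stB : List Int)
    (rl : List Int) : Prop where
  sorted : al.Pairwise (· < ·)
  rng : ∀ v ∈ al, 1 ≤ v ∧ v ≤ n
  cur : (0 ≤ pos ∧ pos < (al.length : Int) ∧ ka = al.getD pos.toNat 0) ∨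
        (pos = -1 ∧ ka = 0) ∨
        (pos = (al.length : Int) ∧ ka = n + 1) ∨
        (pos < -1 ∨ (al.length : Int) < pos ∨ n < 0)
  dict : DictInv n d al
  oxLen : ox.length = n.toNat
  oxVal : ∀ j : Nat, j < n.toNat → ox.getD j "" = (if ((j : Int) + 1) ∈ al then "O" else "X")
  stk : StackRel n d al stA.reverse stB.reverse rl
  invEmpty : (pos < -1 ∨ (al.length : Int) < pos ∨ n < 0) → stA = []

-- ===== basic list lemmas =====

lemma pwGet {al : List Int} (h : al.Pairwise (· < ·)) {i j : Nat} (hij : i < j)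
    (hj : j < al.length) : al.getD i 0 < al.getD j 0 := by
  rw [List.pairwise_iff_getElem] at h
  rw [List.getD_eq_getElem al 0 (by omega), List.getD_eq_getElem al 0 hj]
  exact h i j (by omega) hj hij

lemma getInj {al : List Int} (h : al.Pairwise (· < ·)) {i j : Nat}
    (hi : i < al.length) (hj : j < al.length) (he : al.getD i 0 = al.getD j 0) : i = j := by
  rcases lt_trichotomy i j with h' | h' | h'
  · have := pwGet h h' hj; omega
  · exact h'
  · have := pwGet h h' hi; omega

lemma getD_mem {al : List Int} {i : Nat} (hi : i < al.length) : al.getD i 0 ∈ al := by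
  rw [List.getD_eq_getElem al 0 hi]; exact List.getElem_mem hi

lemma rnk_le (al : List Int) (v : Int) : rnk al v ≤ al.length := List.countP_le_length

lemma rnk_lt_spec {al : List Int} (h : al.Pairwise (· < ·)) (v : Int) :
    ∀ j : Nat, j < rnk al v → al.getD j 0 < v := by
  induction al with
  | nil => intro j hj; simp [rnk] at hj
  | cons x t ih =>
    rcases List.pairwise_cons.mp h with ⟨hx, ht⟩
    intro j hj
    by_cases hxv : x < v
    · rcases j with _ | j
      · simpa using hxv
      · have : rnk (x :: t) v = rnk t v + 1 := by
          simp [rnk, List.countP_cons, hxv]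
        exact ih ht j (by omega)
    · have h0 : rnk (x :: t) v = 0 := by
        have : t.countP (fun a => decide (a < v)) = 0 := by
          rw [List.countP_eq_zero]
          intro a ha
          have := hx a ha
          simp only [decide_eq_true_eq]
          omega
        simp [rnk, List.countP_cons, hxv, this]
      omega

lemma rnk_ge_spec {al : List Int} (h : al.Pairwise (· < ·)) (v : Int) :
    ∀ j : Nat, rnk al v ≤ j → j < al.length → ¬ (al.getD j 0 < v) := by
  induction al with
  | nil => intro j _ hj; simp at hj
  | cons x t ih =>
    rcases List.pairwise_cons.mp h with ⟨hx, ht⟩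
    intro j hj hlen
    by_cases hxv : x < v
    · have hr : rnk (x :: t) v = rnk t v + 1 := by
        simp [rnk, List.countP_cons, hxv]
      rcases j with _ | j
      · omega
      · exact ih ht j (by omega) (by simpa using hlen)
    · rcases j with _ | j
      · simpa using hxv
      · have hmem : t.getD j 0 ∈ t := getD_mem (by simpa using hlen)
        have := hx _ hmem
        simp only [List.getD_cons_succ]
        omega

lemma gt_of_rnk_le {al : List Int} (h : al.Pairwise (· < ·)) {v : Int} (hv : v ∉ al)
    {j : Nat} (hj : rnk al v ≤ j) (hlen : j < al.length) : v < al.getD j 0 := by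
  have h1 := rnk_ge_spec h v j hj hlen
  have h2 : al.getD j 0 ≠ v := by
    intro hc; exact hv (hc ▸ getD_mem hlen)
  omega

-- ===== insS (sorted insertion) lemmas =====

lemma length_insS (al : List Int) (v : Int) : (insS al v).length = al.length + 1 := by
  have := rnk_le al v
  simp [insS]

lemma getD_insS_lt {al : List Int} {v : Int} {j : Nat} (hj : j < rnk al v) :
    (insS al v).getD j 0 = al.getD j 0 := by
  have hc := rnk_le al v
  have hlt : j < (al.take (rnk al v)).length := by simp; omega
  rw [insS, List.getD_append _ _ _ _ hlt,
      List.getD_eq_getElem _ 0 hlt, List.getElem_take,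
      List.getD_eq_getElem _ 0 (by omega)]

lemma getD_insS_eq {al : List Int} {v : Int} : (insS al v).getD (rnk al v) 0 = v := by
  have hc := rnk_le al v
  have hlen : (al.take (rnk al v)).length = rnk al v := by simp; omega
  rw [insS, List.getD_append_right _ _ _ _ (by omega), hlen, Nat.sub_self]
  rfl

lemma getD_insS_gt {al : List Int} {v : Int} {j : Nat} (hjc : rnk al v < j)
    (hj : j < al.length + 1) : (insS al v).getD j 0 = al.getD (j - 1) 0 := by
  have hc := rnk_le al v
  have hlen : (al.take (rnk al v)).length = rnk al v := by simp; omega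
  rw [insS, List.getD_append_right _ _ _ _ (by omega), hlen]
  have hne : j - rnk al v ≠ 0 := by omega
  rcases Nat.exists_eq_succ_of_ne_zero hne with ⟨m, hm⟩
  rw [hm, List.getD_cons_succ]
  have hd : m < (al.drop (rnk al v)).length := by simp; omega
  rw [List.getD_eq_getElem _ 0 hd, List.getElem_drop,
      List.getD_eq_getElem _ 0 (by omega)]
  congr 1
  omega

lemma mem_insS {al : List Int} {v w : Int} : w ∈ insS al v ↔ w = v ∨ w ∈ al := by
  have h0 : w ∈ al ↔ w ∈ al.take (rnk al v) ∨ w ∈ al.drop (rnk al v) := by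
    conv_lhs => rw [← List.take_append_drop (rnk al v) al]
    exact List.mem_append
  rw [insS]
  simp only [List.mem_append, List.mem_cons]
  tauto

lemma sorted_insS {al : List Int} (h : al.Pairwise (· < ·)) {v : Int} (hv : v ∉ al) :
    (insS al v).Pairwise (· < ·) := by
  have hc := rnk_le al v
  rw [List.pairwise_iff_getElem]
  intro i j hi hj hij
  rw [length_insS] at hj
  have gi : (insS al v)[i] = (insS al v).getD i 0 := by
    rw [List.getD_eq_getElem _ 0 (by rw [length_insS]; omega)]
  have gj : (insS al v)[j] = (insS al v).getD j 0 := by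
    rw [List.getD_eq_getElem _ 0 (by rw [length_insS]; omega)]
  rw [gi, gj]
  rcases lt_trichotomy i (rnk al v) with h1 | h1 | h1 <;>
    rcases lt_trichotomy j (rnk al v) with h2 | h2 | h2 <;>
      try omega
  · rw [getD_insS_lt h1, getD_insS_lt h2]; exact pwGet h hij (by omega)
  · rw [getD_insS_lt h1, h2, getD_insS_eq]; exact rnk_lt_spec h v i h1
  · rw [getD_insS_lt h1, getD_insS_gt h2 hj]
    by_cases he : i = j - 1
    · subst he; exact rnk_lt_spec h v _ h1 |>.trans (gt_of_rnk_le h hv (by omega) (by omega))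
    · exact pwGet h (by omega) (by omega)
  · rw [h1, getD_insS_eq, getD_insS_gt h2 hj]
    exact gt_of_rnk_le h hv (by omega) (by omega)
  · rw [getD_insS_gt h1 (by omega), getD_insS_gt h2 hj]
    exact pwGet h (by omega) (by omega)

lemma rnk_eraseIdx_at {al : List Int} (h : al.Pairwise (· < ·)) {i : Nat}
    (hi : i < al.length) : rnk (al.eraseIdx i) (al.getD i 0) = i := by
  set v := al.getD i 0 with hv
  rw [List.eraseIdx_eq_take_drop_succ, rnk, List.countP_append]
  have h1 : (al.take i).countP (fun a => decide (a < v)) = (al.take i).length := by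
    rw [List.countP_eq_length]
    intro a ha
    rw [List.mem_iff_getElem] at ha
    rcases ha with ⟨j, hjl, hja⟩
    have hjl' : j < i ∧ j < al.length := by simpa using hjl
    rw [List.getElem_take] at hja
    have : al.getD j 0 < v := pwGet h hjl'.1 hi
    rw [List.getD_eq_getElem _ 0 (by omega)] at this
    simp only [decide_eq_true_eq]
    omega
  have h2 : (al.drop (i+1)).countP (fun a => decide (a < v)) = 0 := by
    rw [List.countP_eq_zero]
    intro a ha
    rw [List.mem_iff_getElem] at ha
    rcases ha with ⟨j, hjl, hja⟩
    have hjl' : i + 1 + j < al.length := by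
      have : (al.drop (i+1)).length = al.length - (i+1) := List.length_drop
      omega
    rw [List.getElem_drop] at hja
    have : v < al.getD (i+1+j) 0 := pwGet h (by omega) (by omega)
    rw [List.getD_eq_getElem _ 0 hjl'] at this
    simp only [decide_eq_true_eq]
    omega
  rw [h1, h2]
  simp
  omega

lemma insS_eraseIdx {al : List Int} (h : al.Pairwise (· < ·)) {i : Nat}
    (hi : i < al.length) : insS (al.eraseIdx i) (al.getD i 0) = al := by
  rw [insS, rnk_eraseIdx_at h hi, List.eraseIdx_eq_take_drop_succ]
  have hlen : (al.take i).length = i := by simp; omega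
  rw [List.take_append_of_le_length (by omega), List.take_take, min_self]
  have hdrop : ((al.take i) ++ al.drop (i+1)).drop ((al.take i).length) = al.drop (i+1) :=
    List.drop_left
  rw [hlen] at hdrop
  rw [hdrop]
  rw [List.getD_eq_getElem _ 0 hi]
  conv_rhs => rw [← List.take_append_drop i al, List.drop_eq_getElem_cons hi]

lemma mem_eraseIdx_sorted {al : List Int} (h : al.Pairwise (· < ·)) {i : Nat}
    (hi : i < al.length) (w : Int) :
    w ∈ al.eraseIdx i ↔ (w ∈ al ∧ w ≠ al.getD i 0) := by
  rw [List.mem_eraseIdx_iff_getElem]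
  constructor
  · rintro ⟨j, hj, hji, hjw⟩
    refine ⟨hjw ▸ List.getElem_mem hj, ?_⟩
    intro hc
    apply hji
    apply getInj h hj hi
    rw [List.getD_eq_getElem _ 0 hj, hjw, hc]
  · rintro ⟨hw, hne⟩
    rw [List.mem_iff_getElem] at hw
    rcases hw with ⟨j, hj, hjw⟩
    refine ⟨j, hj, ?_, hjw⟩
    intro hc
    subst hc
    apply hne
    rw [← hjw, List.getD_eq_getElem _ 0 hj]

-- ===== dict surgery =====

-- the common shape of A's pointer writes in both the C and the Z branch:
-- set d[nx].prev := a and d[p].next := b, skipping the sentinel sides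
def linkWrite (n p nx a b : Int) (d : PySem.Dict Int (Int × Int)) :
    PySem.Dict Int (Int × Int) :=
  if p = 0 then d.modify nx (0, 0) (fun q => (a, q.2))
  else if nx = n + 1 then d.modify p (0, 0) (fun q => (q.1, b))
  else (d.modify p (0, 0) (fun q => (q.1, b))).modify nx (0, 0) (fun q => (a, q.2))

lemma getD_linkWrite {n p nx a b w : Int} (d : PySem.Dict Int (Int × Int))
    (hw1 : 1 ≤ w) (hw2 : w ≤ n) (hpn : p < nx) :
    (linkWrite n p nx a b d).getD w (0, 0) =
      ((if w = nx then a else (d.getD w (0, 0)).1),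
       (if w = p then b else (d.getD w (0, 0)).2)) := by
  have hne : ((nx : Int) = p) = False := eq_false (by omega)
  have hw0 : (w = (0 : Int)) = False := eq_false (by omega)
  have hwn1 : (w = n + 1) = False := eq_false (by omega)
  by_cases h1 : p = 0
  · have hwp : (w = p) = False := eq_false (by omega)
    by_cases hwn : w = nx
    · subst hwn
      simp [linkWrite, h1, PySem.Dict.getD_modify, hwp, hw0, hwn1]
    · simp [linkWrite, h1, PySem.Dict.getD_modify, hwp, hwn, hw0, hwn1]
  · by_cases h2 : nx = n + 1
    · have hwn : (w = nx) = False := eq_false (by omega)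
      by_cases hwp : w = p
      · subst hwp
        simp [linkWrite, h1, h2, PySem.Dict.getD_modify, hwn, hw0, hwn1]
      · simp [linkWrite, h1, h2, PySem.Dict.getD_modify, hwn, hwp, hw0, hwn1]
    · by_cases hwn : w = nx
      · subst hwn
        simp [linkWrite, h1, h2, PySem.Dict.getD_modify, hne, hw0, hwn1]
      · by_cases hwp : w = p
        · subst hwp
          simp [linkWrite, h1, h2, PySem.Dict.getD_modify, hwn, hne, hw0, hwn1]
        · simp [linkWrite, h1, h2, PySem.Dict.getD_modify, hwn, hwp, hw0, hwn1]

lemma getD_linkWrite_of_ne {n p nx a b w : Int} (d : PySem.Dict Int (Int × Int))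
    (hp : w ≠ p) (hn : w ≠ nx) :
    (linkWrite n p nx a b d).getD w (0, 0) = d.getD w (0, 0) := by
  unfold linkWrite
  split_ifs with h1 h2
  · rw [PySem.Dict.getD_modify, if_neg hn]
  · rw [PySem.Dict.getD_modify, if_neg hp]
  · rw [PySem.Dict.getD_modify, if_neg hn, PySem.Dict.getD_modify, if_neg hp]

lemma getD_congr (al : List Int) {i j : Nat} (h : i = j) : al.getD i 0 = al.getD j 0 := by
  rw [h]

-- restoring v: writing v into its neighbours' pointers re-establishes the dict
-- invariant for the list with v re-inserted
lemma dict_include {n : Int} {d : PySem.Dict Int (Int × Int)} {alS : List Int} {v : Int}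
    (hs : alS.Pairwise (· < ·)) (hv : v ∉ alS)
    (hr : ∀ w ∈ alS, 1 ≤ w ∧ w ≤ n) (hv1 : 1 ≤ v) (hv2 : v ≤ n)
    (hD : DictInv n d alS)
    (hst : d.getD v (0, 0) =
      ((if rnk alS v = 0 then 0 else alS.getD (rnk alS v - 1) 0),
       (if rnk alS v = alS.length then n + 1 else alS.getD (rnk alS v) 0))) :
    DictInv n (linkWrite n
        (if rnk alS v = 0 then 0 else alS.getD (rnk alS v - 1) 0)
        (if rnk alS v = alS.length then n + 1 else alS.getD (rnk alS v) 0)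
        v v d) (insS alS v) := by
  set c := rnk alS v with hcdef
  set pv := (if c = 0 then 0 else alS.getD (c - 1) 0) with hpvdef
  set nv := (if c = alS.length then n + 1 else alS.getD c 0) with hnvdef
  have hcle : c ≤ alS.length := rnk_le alS v
  have hpv : pv < v := by
    rw [hpvdef]
    split_ifs with h0
    · omega
    · exact rnk_lt_spec hs v (c - 1) (by omega)
  have hnv : v < nv := by
    rw [hnvdef]
    split_ifs with h0
    · omega
    · exact gt_of_rnk_le hs hv (by omega) (by omega)
  have hbnd : ∀ j, j < alS.length → 1 ≤ alS.getD j 0 ∧ alS.getD j 0 ≤ n :=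
    fun j hj => hr _ (getD_mem hj)
  have hpv_eq : ∀ j, j < alS.length → (alS.getD j 0 = pv ↔ (j = c - 1 ∧ c ≠ 0)) := by
    intro j hj
    constructor
    · intro he
      rw [hpvdef] at he
      by_cases h0 : c = 0
      · rw [if_pos h0] at he
        have := hbnd j hj; omega
      · rw [if_neg h0] at he
        exact ⟨getInj hs hj (by omega) he, h0⟩
    · rintro ⟨h1, h2⟩
      rw [hpvdef, if_neg h2]
      exact getD_congr alS h1
  have hnv_eq : ∀ j, j < alS.length → (alS.getD j 0 = nv ↔ j = c) := by
    intro j hj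
    constructor
    · intro he
      rw [hnvdef] at he
      by_cases h0 : c = alS.length
      · rw [if_pos h0] at he
        have := hbnd j hj; omega
      · rw [if_neg h0] at he
        exact getInj hs hj (by omega) he
    · intro h1
      have h0 : c ≠ alS.length := by omega
      rw [hnvdef, if_neg h0]
      exact getD_congr alS h1
  intro i hi
  rw [length_insS] at hi
  rw [length_insS]
  rcases lt_trichotomy i c with hic | hic | hic
  · -- i < c : entry alS[i]
    rw [getD_insS_lt hic]
    have hil : i < alS.length := by omega
    rw [getD_linkWrite d (hbnd i hil).1 (hbnd i hil).2 (lt_trans hpv hnv)]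
    rw [if_neg (show ¬ (alS.getD i 0 = nv) from
      fun he => by have := (hnv_eq i hil).mp he; omega)]
    rw [hD i hil]
    by_cases hieq : i = c - 1 ∧ c ≠ 0
    · rw [if_pos ((hpv_eq i hil).mpr hieq)]
      rw [Prod.mk.injEq]
      refine ⟨?_, ?_⟩
      · by_cases h0 : i = 0
        · rw [if_pos h0, if_pos h0]
        · rw [if_neg h0, if_neg h0]
          exact (getD_insS_lt (by omega)).symm
      · rw [if_neg (show ¬ (i + 1 = alS.length + 1) by omega)]
        rw [show i + 1 = c by omega, getD_insS_eq]
    · rw [if_neg (show ¬ (alS.getD i 0 = pv) from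
        fun he => by have := (hpv_eq i hil).mp he; omega)]
      rw [Prod.mk.injEq]
      refine ⟨?_, ?_⟩
      · by_cases h0 : i = 0
        · rw [if_pos h0, if_pos h0]
        · rw [if_neg h0, if_neg h0]
          exact (getD_insS_lt (by omega)).symm
      · rw [if_neg (show ¬ (i + 1 = alS.length) by omega),
           if_neg (show ¬ (i + 1 = alS.length + 1) by omega)]
        exact (getD_insS_lt (by omega)).symm
  · -- i = c : the restored row v itself, untouched in the dict
    rw [hic, getD_insS_eq]
    rw [getD_linkWrite d hv1 hv2 (lt_trans hpv hnv)]
    rw [if_neg (show ¬ (v = nv) by omega), if_neg (show ¬ (v = pv) by omega), hst]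
    rw [Prod.mk.injEq]
    refine ⟨?_, ?_⟩
    · rw [hpvdef]
      by_cases h0 : c = 0
      · rw [if_pos h0, if_pos h0]
      · rw [if_neg h0, if_neg h0]
        exact (getD_insS_lt (by omega)).symm
    · rw [hnvdef]
      by_cases h0 : c = alS.length
      · rw [if_pos h0, if_pos (show c + 1 = alS.length + 1 by omega)]
      · rw [if_neg h0, if_neg (show ¬ (c + 1 = alS.length + 1) by omega)]
        rw [getD_insS_gt (by omega) (by omega)]
        exact (getD_congr alS (by omega)).symm
  · -- i > c : entry alS[i-1]
    rw [getD_insS_gt hic hi]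
    have hil : i - 1 < alS.length := by omega
    rw [getD_linkWrite d (hbnd _ hil).1 (hbnd _ hil).2 (lt_trans hpv hnv)]
    rw [if_neg (show ¬ (alS.getD (i-1) 0 = pv) from
      fun he => by have := (hpv_eq _ hil).mp he; omega)]
    rw [hD _ hil]
    by_cases hieq : i = c + 1
    · rw [if_pos ((hnv_eq _ hil).mpr (by omega))]
      rw [Prod.mk.injEq]
      refine ⟨?_, ?_⟩
      · rw [if_neg (show ¬ (i = 0) by omega)]
        rw [show i - 1 = c by omega, getD_insS_eq]
      · by_cases h1 : i - 1 + 1 = alS.length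
        · rw [if_pos h1, if_pos (show i + 1 = alS.length + 1 by omega)]
        · rw [if_neg h1, if_neg (show ¬ (i + 1 = alS.length + 1) by omega)]
          rw [getD_insS_gt (by omega) (by omega)]
          exact (getD_congr alS (by omega)).symm
    · rw [if_neg (show ¬ (alS.getD (i-1) 0 = nv) from
        fun he => by have := (hnv_eq _ hil).mp he; omega)]
      rw [Prod.mk.injEq]
      refine ⟨?_, ?_⟩
      · rw [if_neg (show ¬ (i - 1 = 0) by omega), if_neg (show ¬ (i = 0) by omega)]
        rw [getD_insS_gt (by omega) (by omega)]
      · by_cases h1 : i - 1 + 1 = alS.length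
        · rw [if_pos h1, if_pos (show i + 1 = alS.length + 1 by omega)]
        · rw [if_neg h1, if_neg (show ¬ (i + 1 = alS.length + 1) by omega)]
          rw [getD_insS_gt (by omega) (by omega)]
          exact (getD_congr alS (by omega)).symm

-- deleting v: linking its neighbours to each other re-establishes the dict invariant
-- for the list without v, and leaves (pv, nv) frozen at the dead key v
lemma dict_excise {n : Int} {d : PySem.Dict Int (Int × Int)} {alS : List Int} {v : Int}
    (hs : alS.Pairwise (· < ·)) (hv : v ∉ alS)
    (hr : ∀ w ∈ alS, 1 ≤ w ∧ w ≤ n) (hv1 : 1 ≤ v) (hv2 : v ≤ n)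
    (hD : DictInv n d (insS alS v)) :
    DictInv n (linkWrite n
        (if rnk alS v = 0 then 0 else alS.getD (rnk alS v - 1) 0)
        (if rnk alS v = alS.length then n + 1 else alS.getD (rnk alS v) 0)
        (if rnk alS v = 0 then 0 else alS.getD (rnk alS v - 1) 0)
        (if rnk alS v = alS.length then n + 1 else alS.getD (rnk alS v) 0) d) alS ∧
      (linkWrite n
        (if rnk alS v = 0 then 0 else alS.getD (rnk alS v - 1) 0)
        (if rnk alS v = alS.length then n + 1 else alS.getD (rnk alS v) 0)
        (if rnk alS v = 0 then 0 else alS.getD (rnk alS v - 1) 0)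
        (if rnk alS v = alS.length then n + 1 else alS.getD (rnk alS v) 0) d).getD v (0, 0) =
      ((if rnk alS v = 0 then 0 else alS.getD (rnk alS v - 1) 0),
       (if rnk alS v = alS.length then n + 1 else alS.getD (rnk alS v) 0)) := by
  set c := rnk alS v with hcdef
  set pv := (if c = 0 then 0 else alS.getD (c - 1) 0) with hpvdef
  set nv := (if c = alS.length then n + 1 else alS.getD c 0) with hnvdef
  have hcle : c ≤ alS.length := rnk_le alS v
  have hpv : pv < v := by
    rw [hpvdef]
    split_ifs with h0
    · omega
    · exact rnk_lt_spec hs v (c - 1) (by omega)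
  have hnv : v < nv := by
    rw [hnvdef]
    split_ifs with h0
    · omega
    · exact gt_of_rnk_le hs hv (by omega) (by omega)
  have hbnd : ∀ j, j < alS.length → 1 ≤ alS.getD j 0 ∧ alS.getD j 0 ≤ n :=
    fun j hj => hr _ (getD_mem hj)
  have hpv_eq : ∀ j, j < alS.length → (alS.getD j 0 = pv ↔ (j = c - 1 ∧ c ≠ 0)) := by
    intro j hj
    constructor
    · intro he
      rw [hpvdef] at he
      by_cases h0 : c = 0
      · rw [if_pos h0] at he
        have := hbnd j hj; omega
      · rw [if_neg h0] at he
        exact ⟨getInj hs hj (by omega) he, h0⟩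
    · rintro ⟨h1, h2⟩
      rw [hpvdef, if_neg h2]
      exact getD_congr alS h1
  have hnv_eq : ∀ j, j < alS.length → (alS.getD j 0 = nv ↔ j = c) := by
    intro j hj
    constructor
    · intro he
      rw [hnvdef] at he
      by_cases h0 : c = alS.length
      · rw [if_pos h0] at he
        have := hbnd j hj; omega
      · rw [if_neg h0] at he
        exact getInj hs hj (by omega) he
    · intro h1
      have h0 : c ≠ alS.length := by omega
      rw [hnvdef, if_neg h0]
      exact getD_congr alS h1
  have hlen := length_insS alS v
  constructor
  · intro j hj
    rw [getD_linkWrite d (hbnd j hj).1 (hbnd j hj).2 (lt_trans hpv hnv)]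
    by_cases hA : j = c - 1 ∧ c ≠ 0
    · -- predecessor of v: its next pointer is relinked to nv
      rw [if_pos ((hpv_eq j hj).mpr hA)]
      rw [if_neg (show ¬ (alS.getD j 0 = nv) from
        fun he => by have := (hnv_eq j hj).mp he; omega)]
      have hjc : j < c := by omega
      have hh' := hD j (by omega)
      rw [hlen] at hh'
      rw [getD_insS_lt hjc] at hh'
      rw [hh']
      rw [Prod.mk.injEq]
      refine ⟨?_, ?_⟩
      · by_cases h0 : j = 0
        · rw [if_pos h0, if_pos h0]
        · rw [if_neg h0, if_neg h0]
          exact getD_insS_lt (by omega)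
      · rw [hnvdef]
        by_cases h0 : c = alS.length
        · rw [if_pos h0, if_pos (show j + 1 = alS.length by omega)]
        · rw [if_neg h0, if_neg (show ¬ (j + 1 = alS.length) by omega)]
          exact getD_congr alS (by omega)
    · by_cases hB : j = c
      · -- successor of v: its prev pointer is relinked to pv
        have hwnv : alS.getD j 0 = nv := (hnv_eq j hj).mpr hB
        rw [if_pos hwnv]
        rw [if_neg (show ¬ (alS.getD j 0 = pv) by rw [hwnv]; omega)]
        have hh' := hD (j + 1) (by omega)
        rw [hlen] at hh'
        rw [getD_insS_gt (by omega) (by omega)] at hh'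
        rw [show j + 1 - 1 = j from rfl] at hh'
        rw [hh']
        rw [Prod.mk.injEq]
        refine ⟨?_, ?_⟩
        · rw [hpvdef]
          by_cases h0 : c = 0
          · rw [if_pos h0, if_pos (show j = 0 by omega)]
          · rw [if_neg h0, if_neg (show ¬ (j = 0) by omega)]
            exact (getD_congr alS (by omega)).symm
        · by_cases h1 : j + 1 + 1 = alS.length + 1
          · rw [if_pos h1, if_pos (show j + 1 = alS.length by omega)]
          · rw [if_neg h1, if_neg (show ¬ (j + 1 = alS.length) by omega)]
            have hg := @getD_insS_gt alS v (j + 1 + 1) (by omega) (by omega)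
            rw [hg]
            exact getD_congr alS (by omega)
      · -- untouched entries
        rw [if_neg (show ¬ (alS.getD j 0 = nv) from
          fun he => by have := (hnv_eq j hj).mp he; omega)]
        rw [if_neg (show ¬ (alS.getD j 0 = pv) from
          fun he => by have := (hpv_eq j hj).mp he; omega)]
        by_cases hjc : j < c
        · have hh' := hD j (by omega)
          rw [hlen] at hh'
          rw [getD_insS_lt hjc] at hh'
          rw [hh']
          rw [Prod.mk.injEq]
          refine ⟨?_, ?_⟩
          · by_cases h0 : j = 0
            · rw [if_pos h0, if_pos h0]
            · rw [if_neg h0, if_neg h0]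
              exact getD_insS_lt (by omega)
          · rw [if_neg (show ¬ (j + 1 = alS.length + 1) by omega),
               if_neg (show ¬ (j + 1 = alS.length) by omega)]
            exact getD_insS_lt (by omega)
        · have hjc' : c < j := by omega
          have hh' := hD (j + 1) (by omega)
          rw [hlen] at hh'
          rw [getD_insS_gt (by omega) (by omega)] at hh'
          rw [show j + 1 - 1 = j from rfl] at hh'
          rw [hh']
          rw [Prod.mk.injEq]
          refine ⟨?_, ?_⟩
          · rw [if_neg (show ¬ (j + 1 = 0) by omega), if_neg (show ¬ (j = 0) by omega)]
            rw [getD_insS_gt (by omega) (by omega)]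
          · by_cases h1 : j + 1 + 1 = alS.length + 1
            · rw [if_pos h1, if_pos (show j + 1 = alS.length by omega)]
            · rw [if_neg h1, if_neg (show ¬ (j + 1 = alS.length) by omega)]
              have hg := @getD_insS_gt alS v (j + 1 + 1) (by omega) (by omega)
              rw [hg]
              exact getD_congr alS (by omega)
  · -- the dead key v keeps its frozen (pv, nv) entry
    rw [getD_linkWrite_of_ne d (by omega) (by omega)]
    have hh' := hD c (by omega)
    rw [hlen] at hh'
    rw [getD_insS_eq] at hh'
    rw [hh']
    rw [Prod.mk.injEq]
    refine ⟨?_, ?_⟩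
    · rw [hpvdef]
      by_cases h0 : c = 0
      · rw [if_pos h0, if_pos h0]
      · rw [if_neg h0, if_neg h0]
        exact getD_insS_lt (by omega)
    · rw [hnvdef]
      by_cases h0 : c = alS.length
      · rw [if_pos (show c + 1 = alS.length + 1 by omega), if_pos h0]
      · rw [if_neg (show ¬ (c + 1 = alS.length + 1) by omega), if_neg h0]
        rw [getD_insS_gt (by omega) (by omega)]
        exact getD_congr alS (by omega)

-- ===== stack correspondence lemmas =====

lemma stackRel_len {n : Int} {d : PySem.Dict Int (Int × Int)} :
    ∀ {ra : List (Int × Int × Int)} {al : List Int} {rb rl : List Int},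
      StackRel n d al ra rb rl → ra.length = rb.length ∧ ra.length = rl.length := by
  intro ra
  induction ra with
  | nil =>
    intro al rb rl h
    cases rb with
    | nil => cases rl with
      | nil => exact ⟨rfl, rfl⟩
      | cons i t => simp [StackRel] at h
    | cons w t => cases rl <;> simp [StackRel] at h
  | cons e ra ih =>
    intro al rb rl h
    cases rb with
    | nil => cases rl <;> simp [StackRel] at h
    | cons w t =>
      cases rl with
      | nil => simp [StackRel] at h
      | cons i rl' =>
        simp only [StackRel] at h
        have := ih h.2.2.2.2.2.2.2.2
        simp only [List.length_cons]
        omega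

lemma stackRel_congr {n : Int} {d d' : PySem.Dict Int (Int × Int)} :
    ∀ {ra : List (Int × Int × Int)} {al : List Int} {rb rl : List Int},
      StackRel n d al ra rb rl →
      (∀ w, 1 ≤ w → w ≤ n → w ∉ al → d'.getD w (0, 0) = d.getD w (0, 0)) →
      StackRel n d' al ra rb rl := by
  intro ra
  induction ra with
  | nil =>
    intro al rb rl h _
    cases rb with
    | nil => cases rl with
      | nil => exact trivial
      | cons i t => simp [StackRel] at h
    | cons w t => cases rl <;> simp [StackRel] at h
  | cons e ra ih =>
    intro al rb rl h hagree
    cases rb with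
    | nil => cases rl <;> simp [StackRel] at h
    | cons w t =>
      cases rl with
      | nil => simp [StackRel] at h
      | cons i rl' =>
        simp only [StackRel] at h ⊢
        obtain ⟨h1, h2, h3, h4, h5, h6, h7, h8, h9⟩ := h
        refine ⟨h1, h2, h3, h4, h5, h6, ?_, h8, ?_⟩
        · rw [hagree _ h2 h3 h4, h7]
        · exact ih h9 (fun w hw1 hw2 hw3 =>
            hagree w hw1 hw2 (fun hmem => hw3 (mem_insS.mpr (Or.inr hmem))))

-- ===== cursor hop lemmas (a hop may end on a sentinel) =====

lemma hopD {n : Int} {d : PySem.Dict Int (Int × Int)} {al : List Int}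
    (hD : DictInv n d al) :
    ∀ (t p : Nat), p + t ≤ al.length → p < al.length →
      (fun kk => (d.getD kk (0, 0)).2)^[t] (al.getD p 0) =
        if p + t = al.length then n + 1 else al.getD (p + t) 0 := by
  intro t
  induction t with
  | zero =>
    intro p _ hp
    rw [if_neg (by omega)]
    simp
  | succ t ih =>
    intro p hpt hp
    rw [Function.iterate_succ_apply]
    have hstep : (d.getD (al.getD p 0) (0, 0)).2 =
        if p + 1 = al.length then n + 1 else al.getD (p + 1) 0 := by
      rw [hD p hp]
    rw [hstep]
    by_cases hc : p + 1 = al.length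
    · have ht0 : t = 0 := by omega
      subst ht0
      simp [hc]
    · rw [if_neg hc]
      rw [ih (p + 1) (by omega) (by omega)]
      by_cases he : p + (t + 1) = al.length
      · rw [if_pos (by omega), if_pos he]
      · rw [if_neg (by omega), if_neg he]
        exact getD_congr al (by omega)

lemma hopU {n : Int} {d : PySem.Dict Int (Int × Int)} {al : List Int}
    (hD : DictInv n d al) :
    ∀ (t p : Nat), t ≤ p + 1 → p < al.length →
      (fun kk => (d.getD kk (0, 0)).1)^[t] (al.getD p 0) =
        if t = p + 1 then 0 else al.getD (p - t) 0 := by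
  intro t
  induction t with
  | zero =>
    intro p _ _
    rw [if_neg (by omega)]
    simp
  | succ t ih =>
    intro p htp hp
    rw [Function.iterate_succ_apply]
    have hstep : (d.getD (al.getD p 0) (0, 0)).1 =
        if p = 0 then 0 else al.getD (p - 1) 0 := by
      rw [hD p hp]
    rw [hstep]
    by_cases hc : p = 0
    · have ht0 : t = 0 := by omega
      subst ht0
      simp [hc]
    · rw [if_neg hc]
      rw [ih (p - 1) (by omega) (by omega)]
      by_cases he : t + 1 = p + 1
      · rw [if_pos (by omega), if_pos he]
      · rw [if_neg (by omega), if_neg he]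
        exact getD_congr al (by omega)

-- ===== small bridges =====

lemma getD_erase_lt {al : List Int} {i j : Nat} (hi : i < al.length) (hj : j < i) :
    (al.eraseIdx i).getD j 0 = al.getD j 0 := by
  have hl : (al.eraseIdx i).length = al.length - 1 := List.length_eraseIdx_of_lt hi
  rw [List.getD_eq_getElem _ 0 (by omega), List.getD_eq_getElem _ 0 (by omega),
     List.getElem_eraseIdx, dif_pos hj]

lemma getD_erase_ge {al : List Int} {i j : Nat} (hi : i < al.length) (hj : i ≤ j)
    (hj2 : j < al.length - 1) : (al.eraseIdx i).getD j 0 = al.getD (j + 1) 0 := by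
  have hl : (al.eraseIdx i).length = al.length - 1 := List.length_eraseIdx_of_lt hi
  rw [List.getD_eq_getElem _ 0 (by omega), List.getD_eq_getElem _ 0 (by omega),
     List.getElem_eraseIdx, dif_neg (by omega)]

lemma oxUpd {ox : List String} {nN : Nat} (hlen : ox.length = nN)
    {v : Int} (hv1 : 1 ≤ v) (s : String) :
    (PySem.List.pySetD ox (v - 1) s).length = nN ∧
    ∀ j : Nat, j < nN → (PySem.List.pySetD ox (v - 1) s).getD j "" =
      (if (j : Int) + 1 = v then s else ox.getD j "") := by
  rw [PySem.List.pySetD_of_nonneg _ _ (by omega)]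
  refine ⟨by simp [hlen], ?_⟩
  intro j hj
  rw [List.getD_eq_getElem _ _ (by simp [hlen]; omega),
     List.getD_eq_getElem _ _ (by omega), List.getElem_set]
  by_cases he : (v - 1).toNat = j
  · rw [if_pos he, if_pos (by omega)]
  · rw [if_neg he, if_neg (by omega)]

lemma revCons {α : Type} {l : List α} {e : α} {r : List α} (h : l.reverse = e :: r) :
    l.getLast? = some e ∧ l.dropLast.reverse = r := by
  constructor
  · rw [List.getLast?_eq_head?_reverse, h]; rfl
  · rw [← List.tail_reverse, h]; rfl

-- if n < 0 no row exists
lemma al_nil_of_neg {n : Int} {al : List Int} (hr : ∀ v ∈ al, 1 ≤ v ∧ v ≤ n)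
    (hn : n < 0) : al = [] := by
  cases al with
  | nil => rfl
  | cons a t => have := hr a (by simp); omega

-- ===== the C command preserves the simulation invariant =====

lemma stepC_sim {n : Int} {d : PySem.Dict Int (Int × Int)} {ox : List String} {ka : Int}
    {stA : List (Int × Int × Int)} {al : List Int} {pos : Int} {stB : List Int}
    {rl : List Int}
    (hInv : SimInv n d ox ka stA al pos stB rl)
    (hpl : 0 ≤ pos) (hph : pos < (al.length : Int)) (hcur : ka = al.getD pos.toNat 0)
    (hlen2 : 2 ≤ al.length) :
    SimInv n
      (linkWrite n (d.getD ka (0,0)).1 (d.getD ka (0,0)).2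
        (d.getD ka (0,0)).1 (d.getD ka (0,0)).2 d)
      (PySem.List.pySetD ox (ka - 1) "X")
      (if (d.getD ka (0,0)).2 = n + 1 then (d.getD ka (0,0)).1 else (d.getD ka (0,0)).2)
      (stA ++ [((d.getD ka (0,0)).1, (d.getD ka (0,0)).2, ka)])
      (al.eraseIdx pos.toNat)
      (if pos = ((al.eraseIdx pos.toNat).length : Int) then pos - 1 else pos)
      (stB ++ [ka])
      (pos :: rl) := by
  have hs := hInv.sorted
  have hr := hInv.rng
  have hdict := hInv.dict
  have hoxl := hInv.oxLen
  have hoxv := hInv.oxVal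
  have hstk := hInv.stk
  set i := pos.toNat with hidef
  have hi0 : i < al.length := by omega
  have hka : ka = al.getD i 0 := hcur
  have hvb : 1 ≤ ka ∧ ka ≤ n := by rw [hka]; exact hr _ (getD_mem hi0)
  have hdk := hdict i hi0
  rw [← hka] at hdk
  have hpr : (d.getD ka (0,0)).1 = (if i = 0 then 0 else al.getD (i - 1) 0) := by
    rw [hdk]
  have hnx : (d.getD ka (0,0)).2 =
      (if i + 1 = al.length then n + 1 else al.getD (i + 1) 0) := by
    rw [hdk]
  set alS := al.eraseIdx i with halS
  have hlenS : alS.length = al.length - 1 := List.length_eraseIdx_of_lt hi0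
  have hsS : alS.Pairwise (· < ·) := List.Pairwise.sublist (List.eraseIdx_sublist al i) hs
  have hmemS : ∀ w, w ∈ alS ↔ (w ∈ al ∧ w ≠ al.getD i 0) :=
    fun w => mem_eraseIdx_sorted hs hi0 w
  have hvnot : ka ∉ alS := by
    rw [hka, hmemS]
    intro hc
    exact hc.2 rfl
  have hrS : ∀ w ∈ alS, 1 ≤ w ∧ w ≤ n := fun w hw => hr w ((hmemS w).mp hw).1
  have hrnkS : rnk alS ka = i := by rw [hka]; exact rnk_eraseIdx_at hs hi0
  have hprS : (d.getD ka (0,0)).1 =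
      (if rnk alS ka = 0 then 0 else alS.getD (rnk alS ka - 1) 0) := by
    rw [hrnkS, hpr]
    by_cases h0 : i = 0
    · rw [if_pos h0, if_pos h0]
    · rw [if_neg h0, if_neg h0, getD_erase_lt hi0 (by omega)]
  have hnxS : (d.getD ka (0,0)).2 =
      (if rnk alS ka = alS.length then n + 1 else alS.getD (rnk alS ka) 0) := by
    rw [hrnkS, hnx]
    by_cases h0 : i + 1 = al.length
    · rw [if_pos (by omega), if_pos (by omega)]
    · rw [if_neg h0, if_neg (by omega), getD_erase_ge hi0 (le_refl i) (by omega)]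
  have hD' : DictInv n d (insS alS ka) := by
    rw [hka, insS_eraseIdx hs hi0]
    exact hdict
  have hexc := dict_excise hsS hvnot hrS hvb.1 hvb.2 hD'
  rw [← hprS, ← hnxS] at hexc
  have hnxiff : ((d.getD ka (0,0)).2 = n + 1) ↔ (i + 1 = al.length) := by
    rw [hnx]
    by_cases h0 : i + 1 = al.length
    · simp [h0]
    · rw [if_neg h0]
      have := hr _ (getD_mem (show i + 1 < al.length by omega))
      constructor
      · intro hc; omega
      · intro hc; omega
  have hcond : (pos = ((alS.length : Nat) : Int)) ↔ (i + 1 = al.length) := by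
    omega
  have hox := oxUpd hoxl (v := ka) (by omega) "X"
  refine ⟨hsS, hrS, ?_, hexc.1, hox.1, ?_, ?_, ?_⟩
  · -- cursor: stays on an alive row
    left
    refine ⟨?_, ?_, ?_⟩
    · split_ifs with hc
      · have := hcond.mp hc
        omega
      · omega
    · split_ifs with hc
      · omega
      · rw [hcond] at hc
        omega
    · by_cases hc : i + 1 = al.length
      · rw [if_pos (hnxiff.mpr hc), if_pos (hcond.mpr hc), hpr,
           if_neg (show ¬ (i = 0) by omega), (getD_erase_lt hi0 (by omega)).symm]
        exact getD_congr alS (by omega)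
      · rw [if_neg (fun hx => hc (hnxiff.mp hx)), if_neg (fun hx => hc (hcond.mp hx)), hnx,
           if_neg hc, (getD_erase_ge hi0 (le_refl i) (by omega)).symm]
  · -- OX values
    intro j hj
    rw [hox.2 j hj]
    by_cases he : (j : Int) + 1 = ka
    · rw [if_pos he, if_neg (show ¬ ((j:Int) + 1 ∈ alS) from
        fun hmem => ((hmemS _).mp hmem).2 (by omega))]
    · rw [if_neg he, hoxv j hj]
      by_cases hm : ((j : Int) + 1) ∈ al
      · rw [if_pos hm, if_pos ((hmemS _).mpr ⟨hm, by omega⟩)]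
      · rw [if_neg hm, if_neg (fun hmem => hm ((hmemS _).mp hmem).1)]
  · -- stack correspondence
    rw [List.reverse_append, List.reverse_append]
    simp only [List.reverse_cons, List.reverse_nil, List.nil_append, List.cons_append,
      List.singleton_append]
    refine ⟨rfl, hvb.1, hvb.2, hvnot, hprS, hnxS, hexc.2, by rw [hrnkS]; omega, ?_⟩
    have hback : insS alS ka = al := by rw [hka]; exact insS_eraseIdx hs hi0
    rw [hback]
    refine stackRel_congr hstk ?_
    intro w hw1 hw2 hwal
    apply getD_linkWrite_of_ne
    · rw [hpr]
      by_cases h0 : i = 0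
      · rw [if_pos h0]; omega
      · rw [if_neg h0]
        intro hc
        exact hwal (hc ▸ getD_mem (show i - 1 < al.length by omega))
    · rw [hnx]
      by_cases h0 : i + 1 = al.length
      · rw [if_pos h0]; omega
      · rw [if_neg h0]
        intro hc
        exact hwal (hc ▸ getD_mem (show i + 1 < al.length by omega))
  · -- the new state is never degenerate
    intro h
    exfalso
    have hn1 : 1 ≤ n := by omega
    rcases h with h | h | h
    · split_ifs at h with hc
      · have := hcond.mp hc; omega
      · omega
    · split_ifs at h with hc <;> omega
    · omega

-- ===== the Z command preserves the simulation invariant =====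

lemma stepZ_sim {n : Int} {d : PySem.Dict Int (Int × Int)} {ox : List String} {ka : Int}
    {stA : List (Int × Int × Int)} {al : List Int} {pos : Int} {stB : List Int}
    {p nx now : Int} {ra : List (Int × Int × Int)} {w : Int} {rb : List Int}
    {i : Int} {rl' : List Int}
    (hInv : SimInv n d ox ka stA al pos stB (i :: rl'))
    (hra : stA.reverse = (p, nx, now) :: ra) (hrb : stB.reverse = w :: rb) :
    SimInv n
      (linkWrite n p nx now now d)
      (PySem.List.pySetD ox (now - 1) "O")
      ka
      stA.dropLast
      (insS al now)
      (if ((rnk al now : Nat) : Int) ≤ pos then pos + 1 else pos)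
      stB.dropLast
      rl' := by
  have hs := hInv.sorted
  have hr := hInv.rng
  have hdict := hInv.dict
  have hoxl := hInv.oxLen
  have hoxv := hInv.oxVal
  have hstk := hInv.stk
  rw [hra, hrb] at hstk
  have hfacts : w = now ∧ 1 ≤ now ∧ now ≤ n ∧ now ∉ al ∧
      p = (if rnk al now = 0 then 0 else al.getD (rnk al now - 1) 0) ∧
      nx = (if rnk al now = al.length then n + 1 else al.getD (rnk al now) 0) ∧
      d.getD now (0, 0) = (p, nx) ∧
      i = ((rnk al now : Nat) : Int) ∧
      StackRel n d (insS al now) ra rb rl' := hstk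
  obtain ⟨hw, h1, h2, hnot, h5, h6, h7, hi8, h8⟩ := hfacts
  have hnA : stA ≠ [] := by
    intro hc
    rw [hc] at hra
    simp at hra
  -- the cursor cannot be in the degenerate region: the stack is nonempty
  have hcurOK : (0 ≤ pos ∧ pos < (al.length : Int) ∧ ka = al.getD pos.toNat 0) ∨
      (pos = -1 ∧ ka = 0) ∨ (pos = (al.length : Int) ∧ ka = n + 1) := by
    rcases hInv.cur with hc | hc | hc | hc
    · exact Or.inl hc
    · exact Or.inr (Or.inl hc)
    · exact Or.inr (Or.inr hc)
    · exact absurd (hInv.invEmpty hc) hnA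
  have hcle : rnk al now ≤ al.length := rnk_le al now
  have hlenS := length_insS al now
  have hox := oxUpd hoxl (v := now) (by omega) "O"
  refine ⟨sorted_insS hs hnot, ?_, ?_, ?_, hox.1, ?_, ?_, ?_⟩
  · intro v hv
    rcases mem_insS.mp hv with h | h
    · omega
    · exact hr v h
  · -- cursor
    rcases hcurOK with ⟨hpl, hph, hcur⟩ | ⟨hp, hk⟩ | ⟨hp, hk⟩
    · left
      refine ⟨by split_ifs <;> omega, by rw [hlenS]; split_ifs <;> omega, ?_⟩
      by_cases hc : ((rnk al now : Nat) : Int) ≤ pos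
      · rw [if_pos hc, hcur]
        rw [getD_insS_gt (by omega) (by omega)]
        exact getD_congr al (by omega)
      · rw [if_neg hc, hcur]
        exact (getD_insS_lt (by omega)).symm
    · right; left
      rw [if_neg (by omega)]
      exact ⟨hp, hk⟩
    · right; right; left
      rw [if_pos (by omega)]
      constructor
      · rw [hlenS]; omega
      · exact hk
  · -- dict
    have hinc := dict_include hs hnot hr h1 h2 hdict (by rw [h7, h5, h6])
    rw [← h5, ← h6] at hinc
    exact hinc
  · -- OX values
    intro j hj
    rw [hox.2 j hj]
    by_cases he : (j : Int) + 1 = now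
    · rw [if_pos he, if_pos (mem_insS.mpr (Or.inl (by omega)))]
    · rw [if_neg he, hoxv j hj]
      by_cases hm : ((j : Int) + 1) ∈ al
      · rw [if_pos hm, if_pos (mem_insS.mpr (Or.inr hm))]
      · rw [if_neg hm, if_neg (fun hmem => by
          rcases mem_insS.mp hmem with h | h
          · omega
          · exact hm h)]
  · -- stack correspondence
    rw [(revCons hra).2, (revCons hrb).2]
    refine stackRel_congr h8 ?_
    intro v hv1 hv2 hvnot
    apply getD_linkWrite_of_ne
    · rw [h5]
      by_cases h0 : rnk al now = 0
      · rw [if_pos h0]; omega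
      · rw [if_neg h0]
        intro hc
        exact hvnot (mem_insS.mpr (Or.inr
          (hc ▸ getD_mem (show rnk al now - 1 < al.length by omega))))
    · rw [h6]
      by_cases h0 : rnk al now = al.length
      · rw [if_pos h0]; omega
      · rw [if_neg h0]
        intro hc
        exact hvnot (mem_insS.mpr (Or.inr
          (hc ▸ getD_mem (show rnk al now < al.length by omega))))
  · -- the new state is never degenerate
    intro h
    exfalso
    rcases h with h | h | h
    · rcases hcurOK with ⟨hpl, _, _⟩ | ⟨hp, _⟩ | ⟨hp, _⟩ <;> split_ifs at h <;> omega
    · rw [hlenS] at h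
      rcases hcurOK with ⟨hpl, hph, _⟩ | ⟨hp, _⟩ | ⟨hp, _⟩ <;> split_ifs at h <;> omega
    · omega

-- an in-range cursor index is an alive row
lemma cur_alive {n : Int} {d : PySem.Dict Int (Int × Int)} {ox : List String} {ka : Int}
    {stA : List (Int × Int × Int)} {al : List Int} {pos : Int} {stB : List Int}
    {rl : List Int} (hInv : SimInv n d ox ka stA al pos stB rl)
    (h0 : 0 ≤ pos) (h1 : pos < (al.length : Int)) : ka = al.getD pos.toNat 0 := by
  rcases hInv.cur with ⟨_, _, h⟩ | ⟨h, _⟩ | ⟨h, _⟩ | (h | h | h)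
  · exact h
  · omega
  · omega
  · omega
  · omega
  · have := al_nil_of_neg hInv.rng h
    subst this
    simp at h1
    omega

-- ===== the main simulation: the two loops stay in lock-step =====

lemma sim_main {n : Int} :
    ∀ (cmd : List String) (d : PySem.Dict Int (Int × Int)) (ox : List String) (ka : Int)
      (stA : List (Int × Int × Int)) (al : List Int) (pos : Int) (stB : List Int)
      (rl : List Int),
      SimInv n d ox ka stA al pos stB rl →
      okCmds cmd pos ((al.length : Nat) : Int) rl = true →
      ∃ rl', SimInv n (cmd.foldl (stepA n) (d, ox, ka, stA)).1
        (cmd.foldl (stepA n) (d, ox, ka, stA)).2.1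
        (cmd.foldl (stepA n) (d, ox, ka, stA)).2.2.1
        (cmd.foldl (stepA n) (d, ox, ka, stA)).2.2.2
        (cmd.foldl stepB (al, pos, stB)).1
        (cmd.foldl stepB (al, pos, stB)).2.1
        (cmd.foldl stepB (al, pos, stB)).2.2
        rl' := by
  intro cmd
  induction cmd with
  | nil =>
    intro d ox ka stA al pos stB rl hInv _
    exact ⟨rl, by simpa using hInv⟩
  | cons c r ih =>
    intro d ox ka stA al pos stB rl hInv hok
    rw [List.foldl_cons, List.foldl_cons]
    simp only [okCmds] at hok
    rcases hget : PySem.Str.pyGet? c 0 with _ | ch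
    · simp only [hget] at hok
      simp at hok
    simp only [hget] at hok
    by_cases hDc : ch = 'D'
    · -- move down
      rw [if_pos hDc] at hok
      rcases harg : cmdArg c with _ | x
      · simp only [harg] at hok; exact absurd hok (by simp)
      simp only [harg] at hok
      have hA : stepA n (d, ox, ka, stA) c =
          (d, ox, (PySem.List.pyRange 0 x 1).foldl
            (fun kk _ => (d.getD kk (0, 0)).2) ka, stA) := by
        unfold stepA
        rw [hget]
        simp [hDc, harg]
      have hB : stepB (al, pos, stB) c = (al, pos + max x 0, stB) := by
        unfold stepB
        rw [hget]
        simp [hDc, harg]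
      rw [hA, hB]
      by_cases hx0 : x ≤ 0
      · -- empty range: both sides are a no-op
        rw [if_pos hx0] at hok
        have hmax : max x 0 = 0 := max_eq_right hx0
        have hiter : (PySem.List.pyRange 0 x 1).foldl
            (fun kk _ => (d.getD kk (0, 0)).2) ka = ka := by
          rw [foldlConstIter, PySem.List.length_pyRange_one,
             show (x - 0).toNat = 0 by omega]
          rfl
        rw [hmax, hiter, add_zero]
        exact ih d ox ka stA al pos stB rl hInv hok
      · rw [if_neg hx0] at hok
        rcases Bool.and_eq_true_iff.mp hok with ⟨hx, hok'⟩
        rcases Bool.and_eq_true_iff.mp hx with ⟨hx1, hx2⟩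
        have hx1' : 0 ≤ pos := of_decide_eq_true hx1
        have hx2' : pos + x ≤ ((al.length : Nat) : Int) := of_decide_eq_true hx2
        have hcur := cur_alive hInv hx1' (by omega)
        have hmax : max x 0 = x := max_eq_left (by omega)
        have hkD : (PySem.List.pyRange 0 x 1).foldl
            (fun kk _ => (d.getD kk (0, 0)).2) ka =
            (if pos.toNat + x.toNat = al.length then n + 1
             else al.getD (pos.toNat + x.toNat) 0) := by
          rw [foldlConstIter, PySem.List.length_pyRange_one, hcur,
             hopD hInv.dict ((x - 0).toNat) pos.toNat (by omega) (by omega)]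
          by_cases he : pos.toNat + (x - 0).toNat = al.length
          · rw [if_pos he, if_pos (by omega)]
          · rw [if_neg he, if_neg (by omega)]
            exact getD_congr al (by omega)
        have hInv' : SimInv n d ox
            ((PySem.List.pyRange 0 x 1).foldl (fun kk _ => (d.getD kk (0, 0)).2) ka)
            stA al (pos + x) stB rl := by
          refine ⟨hInv.sorted, hInv.rng, ?_, hInv.dict, hInv.oxLen, hInv.oxVal,
            hInv.stk, ?_⟩
          · by_cases hend : pos + x = ((al.length : Nat) : Int)
            · right; right; left
              exact ⟨hend, by rw [hkD, if_pos (by omega)]⟩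
            · left
              refine ⟨by omega, by omega, ?_⟩
              rw [hkD, if_neg (by omega)]
              exact getD_congr al (by omega)
          · intro h
            exfalso
            rcases h with h | h | h
            · omega
            · omega
            · have := al_nil_of_neg hInv.rng h
              subst this
              simp at hx2'
              omega
        rw [hmax]
        exact ih d ox _ stA al (pos + x) stB rl hInv' hok'
    · by_cases hUc : ch = 'U'
      · -- move up
        rw [if_neg hDc, if_pos hUc] at hok
        rcases harg : cmdArg c with _ | x
        · simp only [harg] at hok; exact absurd hok (by simp)
        simp only [harg] at hok
        have hA : stepA n (d, ox, ka, stA) c =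
            (d, ox, (PySem.List.pyRange 0 x 1).foldl
              (fun kk _ => (d.getD kk (0, 0)).1) ka, stA) := by
          unfold stepA
          rw [hget]
          simp [hDc, hUc, harg]
        have hB : stepB (al, pos, stB) c = (al, pos - max x 0, stB) := by
          unfold stepB
          rw [hget]
          simp [hDc, hUc, harg]
        rw [hA, hB]
        by_cases hx0 : x ≤ 0
        · rw [if_pos hx0] at hok
          have hmax : max x 0 = 0 := max_eq_right hx0
          have hiter : (PySem.List.pyRange 0 x 1).foldl
              (fun kk _ => (d.getD kk (0, 0)).1) ka = ka := by
            rw [foldlConstIter, PySem.List.length_pyRange_one,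
               show (x - 0).toNat = 0 by omega]
            rfl
          rw [hmax, hiter, sub_zero]
          exact ih d ox ka stA al pos stB rl hInv hok
        · rw [if_neg hx0] at hok
          rcases Bool.and_eq_true_iff.mp hok with ⟨hx, hok'⟩
          rcases Bool.and_eq_true_iff.mp hx with ⟨hx1, hx2⟩
          have hx1' : pos ≤ ((al.length : Nat) : Int) - 1 := of_decide_eq_true hx1
          have hx2' : -1 ≤ pos - x := of_decide_eq_true hx2
          have hcur := cur_alive hInv (by omega) (by omega)
          have hmax : max x 0 = x := max_eq_left (by omega)
          have hkU : (PySem.List.pyRange 0 x 1).foldl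
              (fun kk _ => (d.getD kk (0, 0)).1) ka =
              (if x.toNat = pos.toNat + 1 then 0
               else al.getD (pos.toNat - x.toNat) 0) := by
            rw [foldlConstIter, PySem.List.length_pyRange_one, hcur,
               hopU hInv.dict ((x - 0).toNat) pos.toNat (by omega) (by omega)]
            by_cases he : (x - 0).toNat = pos.toNat + 1
            · rw [if_pos he, if_pos (by omega)]
            · rw [if_neg he, if_neg (by omega)]
              exact getD_congr al (by omega)
          have hInv' : SimInv n d ox
              ((PySem.List.pyRange 0 x 1).foldl (fun kk _ => (d.getD kk (0, 0)).1) ka)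
              stA al (pos - x) stB rl := by
            refine ⟨hInv.sorted, hInv.rng, ?_, hInv.dict, hInv.oxLen, hInv.oxVal,
              hInv.stk, ?_⟩
            · by_cases hend : pos - x = -1
              · right; left
                exact ⟨hend, by rw [hkU, if_pos (by omega)]⟩
              · left
                refine ⟨by omega, by omega, ?_⟩
                rw [hkU, if_neg (by omega)]
                exact getD_congr al (by omega)
            · intro h
              exfalso
              rcases h with h | h | h
              · omega
              · omega
              · have := al_nil_of_neg hInv.rng h
                subst this
                simp at hx1'
                omega
          rw [hmax]
          exact ih d ox _ stA al (pos - x) stB rl hInv' hok'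
      · by_cases hCc : ch = 'C'
        · -- delete
          rw [if_neg hDc, if_neg hUc, if_pos hCc] at hok
          rcases Bool.and_eq_true_iff.mp hok with ⟨hcnd, hok'⟩
          rcases Bool.and_eq_true_iff.mp hcnd with ⟨hcnd2, hL2⟩
          rcases Bool.and_eq_true_iff.mp hcnd2 with ⟨hp0, hpL⟩
          have hp0' : 0 ≤ pos := of_decide_eq_true hp0
          have hpL' : pos < ((al.length : Nat) : Int) := of_decide_eq_true hpL
          have hL2' : 2 ≤ ((al.length : Nat) : Int) := of_decide_eq_true hL2
          have hcur := cur_alive hInv hp0' hpL'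
          have hA : stepA n (d, ox, ka, stA) c =
              (linkWrite n (d.getD ka (0,0)).1 (d.getD ka (0,0)).2
                 (d.getD ka (0,0)).1 (d.getD ka (0,0)).2 d,
               PySem.List.pySetD ox (ka - 1) "X",
               (if (d.getD ka (0,0)).2 = n + 1 then (d.getD ka (0,0)).1
                else (d.getD ka (0,0)).2),
               stA ++ [((d.getD ka (0,0)).1, (d.getD ka (0,0)).2, ka)]) := by
            unfold stepA
            rw [hget]
            simp [hCc, linkWrite]
          have hpop : PySem.List.pop? al pos =
              some (al.getD pos.toNat 0, al.eraseIdx pos.toNat) := by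
            have h2 := PySem.List.pop?_natCast al pos.toNat (by omega)
            rw [Int.toNat_of_nonneg hp0'] at h2
            rw [h2, List.getD_eq_getElem _ 0 (by omega)]
          have hB : stepB (al, pos, stB) c =
              (al.eraseIdx pos.toNat,
               (if pos = ((al.eraseIdx pos.toNat).length : Int) then pos - 1 else pos),
               stB ++ [ka]) := by
            unfold stepB
            rw [hget]
            simp only [hCc, hpop]
            simp [hcur]
          rw [hA, hB]
          have hInv1 := stepC_sim hInv hp0' hpL' hcur (by omega)
          have hlenS : ((al.eraseIdx pos.toNat).length : Int) = (al.length : Int) - 1 := by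
            have := List.length_eraseIdx_of_lt (show pos.toNat < al.length by omega)
            omega
          refine ih _ _ _ _ _ _ _ _ hInv1 ?_
          have hposS : (if pos = ((al.eraseIdx pos.toNat).length : Int) then pos - 1
              else pos) = (if pos = ((al.length : Nat) : Int) - 1 then pos - 1 else pos) := by
            by_cases hc : pos = ((al.length : Nat) : Int) - 1
            · rw [if_pos (by omega), if_pos hc]
            · rw [if_neg (by omega), if_neg hc]
          rw [hposS, hlenS]
          convert hok' using 2
        · by_cases hZc : ch = 'Z'
          · -- restore
            rw [if_neg hDc, if_neg hUc, if_neg hCc, if_pos hZc] at hok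
            rcases rl with _ | ⟨i, rl'⟩
            · simp at hok
            have hlens := stackRel_len hInv.stk
            rcases hrev : stA.reverse with _ | ⟨e, ra⟩
            · rw [hrev] at hlens
              simp at hlens
            obtain ⟨p, nx, now⟩ := e
            rcases hrevB : stB.reverse with _ | ⟨w, rb⟩
            · rw [hrev, hrevB] at hlens
              simp at hlens
            have hstk := hInv.stk
            rw [hrev, hrevB] at hstk
            have hw : w = now := hstk.1
            have hi : i = ((rnk al now : Nat) : Int) := hstk.2.2.2.2.2.2.2.1
            have hA : stepA n (d, ox, ka, stA) c =
                (linkWrite n p nx now now d,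
                 PySem.List.pySetD ox (now - 1) "O", ka, stA.dropLast) := by
              unfold stepA
              rw [hget]
              simp [hZc, (revCons hrev).1, linkWrite]
            have hidx : al.foldl (fun acc a => if a < w then acc + 1 else acc) 0 =
                ((rnk al now : Nat) : Int) := by
              rw [PySem.List.foldl_ite_add_one (fun a => a < w) al 0, hw]
              simp [rnk]
            have hB : stepB (al, pos, stB) c =
                (insS al now,
                 (if ((rnk al now : Nat) : Int) ≤ pos then pos + 1 else pos),
                 stB.dropLast) := by
              unfold stepB
              rw [hget]
              simp only [hZc, (revCons hrevB).1]
              rw [hidx, hw, PySem.List.insert_natCast al (rnk al now) now (rnk_le al now)]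
              simp [insS]
            rw [hA, hB]
            have hInv1 := stepZ_sim hInv hrev hrevB
            refine ih _ _ _ _ _ _ _ _ hInv1 ?_
            rw [← hi]
            have hlen1 : (((insS al now).length : Nat) : Int) =
                ((al.length : Nat) : Int) + 1 := by
              rw [length_insS]
              omega
            rw [hlen1]
            exact hok
          · -- ignored command
            rw [if_neg hDc, if_neg hUc, if_neg hCc, if_neg hZc] at hok
            have hA : stepA n (d, ox, ka, stA) c = (d, ox, ka, stA) := by
              unfold stepA
              rw [hget]
              simp [hDc, hUc, hCc, hZc]
            have hB : stepB (al, pos, stB) c = (al, pos, stB) := by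
              unfold stepB
              rw [hget]
              simp [hDc, hUc, hCc, hZc]
            rw [hA, hB]
            exact ih _ _ _ _ _ _ _ _ hInv hok

-- ===== initial state =====

lemma getD_init (n : Int) {v : Int} (hv : v ∈ PySem.List.pyRange 1 (n + 1) 1) :
    ((PySem.List.pyRange 1 (n + 1) 1).foldl
      (fun d i => d.insert i (i - 1, i + 1)) PySem.Dict.empty).getD v (0, 0) =
      (v - 1, v + 1) := by
  have hitems := PySem.Dict.items_foldl_insert_fresh (PySem.List.pyRange 1 (n + 1) 1)
    (fun i => i) (fun i => (i - 1, i + 1)) PySem.Dict.empty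
    (fun a _ => PySem.Dict.contains_empty a)
    (by simpa using PySem.List.nodup_pyRange_one 1 (n + 1))
  have hie : (PySem.Dict.empty : PySem.Dict Int (Int × Int)).items = [] := rfl
  apply PySem.Dict.getD_of_mem_items
  · rw [hitems, hie]
    simp only [List.nil_append]
    exact List.mem_map.mpr ⟨v, hv, rfl⟩
  · simp only [PySem.Dict.keys, hitems, hie, List.nil_append, List.map_map]
    have hcomp : List.map ((fun (x : Int × (Int × Int)) => x.1) ∘ fun a : Int => (a, a - 1, a + 1))
        (PySem.List.pyRange 1 (n + 1) 1) = List.map id (PySem.List.pyRange 1 (n + 1) 1) :=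
      List.map_congr_left (fun a _ => rfl)
    rw [hcomp, List.map_id]
    exact PySem.List.nodup_pyRange_one 1 (n + 1)

lemma init_SimInv (n k : Int) :
    SimInv n
      ((PySem.List.pyRange 1 (n + 1) 1).foldl
        (fun d i => d.insert i (i - 1, i + 1)) PySem.Dict.empty)
      ((PySem.List.pyRange 1 (n + 1) 1).map (fun _ => "O"))
      (k + 1) [] (PySem.List.pyRange 1 (n + 1) 1) k [] [] := by
  have hlen : (PySem.List.pyRange 1 (n + 1) 1).length = n.toNat := by
    rw [PySem.List.length_pyRange_one]; omega
  have hget : ∀ j : Nat, j < n.toNat →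
      (PySem.List.pyRange 1 (n + 1) 1).getD j 0 = 1 + (j : Int) := by
    intro j hj
    rw [List.getD_eq_getElem _ 0 (by omega), PySem.List.getElem_pyRange_one]
  refine ⟨PySem.List.pairwise_lt_pyRange_one 1 (n + 1), ?_, ?_, ?_, ?_, ?_, trivial,
    fun _ => rfl⟩
  · intro v hv
    have := PySem.List.mem_pyRange_one.mp hv
    omega
  · -- initial cursor
    by_cases hn : n < 0
    · right; right; right
      exact Or.inr (Or.inr hn)
    · by_cases h1 : 0 ≤ k ∧ k < n
      · left
        refine ⟨h1.1, by omega, ?_⟩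
        rw [hget k.toNat (by omega)]
        omega
      · by_cases h2 : k = -1
        · right; left
          exact ⟨h2, by omega⟩
        · by_cases h3 : k = n
          · right; right; left
            exact ⟨by omega, by omega⟩
          · right; right; right
            omega
  · intro i hi
    rw [hlen] at hi
    rw [hget i hi, getD_init n (by rw [PySem.List.mem_pyRange_one]; omega)]
    rw [Prod.mk.injEq]
    constructor
    · by_cases h0 : i = 0
      · rw [if_pos h0]; omega
      · rw [if_neg h0, hget (i - 1) (by omega)]; omega
    · rw [hlen]
      by_cases h0 : i + 1 = n.toNat
      · rw [if_pos h0]; omega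
      · rw [if_neg h0, hget (i + 1) (by omega)]; omega
  · simp [hlen]
  · intro j hj
    rw [List.getD_eq_getElem _ "" (by simp [hlen]; omega), List.getElem_map]
    rw [if_pos (by rw [PySem.List.mem_pyRange_one]; omega)]

-- ===== final rendering =====

lemma render_eq {n : Int} {d : PySem.Dict Int (Int × Int)} {ox : List String} {ka : Int}
    {stA : List (Int × Int × Int)} {al : List Int} {pos : Int} {stB : List Int}
    {rl : List Int} (hInv : SimInv n d ox ka stA al pos stB rl) :
    ox = (PySem.List.pyRange 1 (n + 1) 1).map
      (fun i => if (PySem.Set.ofList al).contains i then "O" else "X") := by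
  have hlen : (PySem.List.pyRange 1 (n + 1) 1).length = n.toNat := by
    rw [PySem.List.length_pyRange_one]; omega
  have hmem : ∀ x : Int, (PySem.Set.ofList al).contains x = true ↔ x ∈ al := by
    intro x
    simp only [PySem.Set.contains_eq_listContains, List.contains_eq_mem,
      PySem.Set.mem_ofList, decide_eq_true_eq]
  apply List.ext_getElem
  · rw [hInv.oxLen, List.length_map, hlen]
  · intro j h1 h2
    rw [List.getElem_map, PySem.List.getElem_pyRange_one]
    have hj : j < n.toNat := by rw [hInv.oxLen] at h1; omega
    rw [← List.getD_eq_getElem ox "" h1, hInv.oxVal j hj]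
    by_cases hm : ((j : Int) + 1) ∈ al
    · rw [if_pos hm, if_pos (by rw [hmem]; rwa [show 1 + (j:Int) = (j:Int) + 1 by omega])]
    · rw [if_neg hm, if_neg (by rw [hmem, show 1 + (j:Int) = (j:Int) + 1 by omega]; exact hm)]

-- ===== VERDICT (by name: the statement is the Claim_ definition above) =====
theorem solution_spec : Claim_equal_solution := by
  intro n k cmd _ hpre
  unfold Spec_solution solution solution_alt
  show PySem.Str.join "" (cmd.foldl (stepA n)
      ((PySem.List.pyRange 1 (n + 1) 1).foldl
        (fun d i => d.insert i (i - 1, i + 1)) PySem.Dict.empty,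
       (PySem.List.pyRange 1 (n + 1) 1).map (fun _ => "O"), k + 1, [])).2.1 =
    PySem.Str.join "" ((PySem.List.pyRange 1 (n + 1) 1).map
      (fun i => if (PySem.Set.ofList
          (cmd.foldl stepB (PySem.List.pyRange 1 (n + 1) 1, k, [])).1).contains i
        then "O" else "X"))
  have hok : okCmds cmd k (((PySem.List.pyRange 1 (n + 1) 1).length : Nat) : Int) []
      = true := by
    have hlen : (((PySem.List.pyRange 1 (n + 1) 1).length : Nat) : Int) = max n 0 := by
      rw [PySem.List.length_pyRange_one]; omega
    rw [hlen]
    exact hpre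
  obtain ⟨rl', hfin⟩ := sim_main cmd _ _ (k + 1) [] _ k [] [] (init_SimInv n k) hok
  exact congrArg (PySem.Str.join "") (render_eq hfin)
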